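-- pv_equiv track=rewrite | github.com/FortesFortunaAdiuvat/DataProfusion | app/data/economic_indicators.py | get_indicator_info
-- ===== SOURCE A (Python) =====
-- GDP_INDICATORS = {
--     "GDP": "GDP",  # Gross Domestic Product
--     "GDPC1": "GDPC1",  # Real GDP
--     "GDPPOT": "GDPPOT",  # Real Potential GDP
--     "NYGDPMKTPCDWLD": "NYGDPMKTPCDWLD",  # World GDP per capita
-- }
--
-- EMPLOYMENT_INDICATORS = {
--     "UNRATE": "UNRATE",  # Unemployment Rate
--     "CIVPART": "CIVPART",  # Labor Force Participation Rate
--     "EMRATIO": "EMRATIO",  # Employment-Population Ratio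
--     "PAYEMS": "PAYEMS",  # All Employees: Total Nonfarm Payrolls
--     "AWHMAN": "AWHMAN",  # Average Weekly Hours: Manufacturing
-- }
--
-- INFLATION_INDICATORS = {
--     "CPIAUCSL": "CPIAUCSL",  # Consumer Price Index
--     "CPILFESL": "CPILFESL",  # Core CPI (less food and energy)
--     "PCEPI": "PCEPI",  # PCE Price Index
--     "PCEPILFE": "PCEPILFE",  # Core PCE Price Index
--     "DFEDTARU": "DFEDTARU",  # Federal Reserve 2% Inflation Target
-- }
--
-- INTEREST_RATE_INDICATORS = {
--     "FEDFUNDS": "FEDFUNDS",  # Federal Funds Rate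
--     "DGS10": "DGS10",  # 10-Year Treasury Rate
--     "DGS2": "DGS2",  # 2-Year Treasury Rate
--     "DGS3MO": "DGS3MO",  # 3-Month Treasury Rate
--     "MORTGAGE30US": "MORTGAGE30US",  # 30-Year Fixed Rate Mortgage
-- }
--
-- CONSUMER_INDICATORS = {
--     "PCE": "PCE",  # Personal Consumption Expenditures
--     "PSAVERT": "PSAVERT",  # Personal Saving Rate
--     "UMCSENT": "UMCSENT",  # Consumer Sentiment Index
--     "RRSFS": "RRSFS",  # Retail Sales
-- }
--
-- HOUSING_INDICATORS = {
--     "HOUST": "HOUST",  # Housing Starts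
--     "PERMIT": "PERMIT",  # Building Permits
--     "CSUSHPISA": "CSUSHPISA",  # Case-Shiller Home Price Index
--     "EXHOSLUSM495S": "EXHOSLUSM495S",  # Existing Home Sales
-- }
--
-- def get_indicator_info(series_id: str) -> dict[str, str]:
--     """Get category and description for a series ID."""
--     for category_name, indicators in [
--         ("GDP", GDP_INDICATORS),
--         ("Employment", EMPLOYMENT_INDICATORS),
--         ("Inflation", INFLATION_INDICATORS),
--         ("Interest Rates", INTEREST_RATE_INDICATORS),
--         ("Consumer", CONSUMER_INDICATORS),
--         ("Housing", HOUSING_INDICATORS),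
--     ]:
--         if series_id in indicators:
--             return {"category": category_name, "series_id": series_id}
--
--     return {"category": "Other", "series_id": series_id}
-- ===== SOURCE B (Python) =====
-- # One flat, hand-written series_id -> category table; the function is a single
-- # dict lookup with an 'Other' default (no loop, no per-category dicts).
-- CATEGORY_OF = {
--     "GDP": "GDP",
--     "GDPC1": "GDP",
--     "GDPPOT": "GDP",
--     "NYGDPMKTPCDWLD": "GDP",
--     "UNRATE": "Employment",
--     "CIVPART": "Employment",
--     "EMRATIO": "Employment",
--     "PAYEMS": "Employment",
--     "AWHMAN": "Employment",
--     "CPIAUCSL": "Inflation",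
--     "CPILFESL": "Inflation",
--     "PCEPI": "Inflation",
--     "PCEPILFE": "Inflation",
--     "DFEDTARU": "Inflation",
--     "FEDFUNDS": "Interest Rates",
--     "DGS10": "Interest Rates",
--     "DGS2": "Interest Rates",
--     "DGS3MO": "Interest Rates",
--     "MORTGAGE30US": "Interest Rates",
--     "PCE": "Consumer",
--     "PSAVERT": "Consumer",
--     "UMCSENT": "Consumer",
--     "RRSFS": "Consumer",
--     "HOUST": "Housing",
--     "PERMIT": "Housing",
--     "CSUSHPISA": "Housing",
--     "EXHOSLUSM495S": "Housing",
-- }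
--
-- def get_indicator_info(series_id: str) -> dict[str, str]:
--     """Get category and description for a series ID."""
--     return {"category": CATEGORY_OF.get(series_id, "Other"), "series_id": series_id}
-- ===== Notes on version B (the rewrite author's own statement) =====
-- stated objective: simpler
-- what changed: Replaces the per-call loop over six (name, dict) pairs and its membership branch with one hand-written flat series_id-to-category dict; the function body is a single lookup with an 'Other' default.
import Mathlib
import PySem

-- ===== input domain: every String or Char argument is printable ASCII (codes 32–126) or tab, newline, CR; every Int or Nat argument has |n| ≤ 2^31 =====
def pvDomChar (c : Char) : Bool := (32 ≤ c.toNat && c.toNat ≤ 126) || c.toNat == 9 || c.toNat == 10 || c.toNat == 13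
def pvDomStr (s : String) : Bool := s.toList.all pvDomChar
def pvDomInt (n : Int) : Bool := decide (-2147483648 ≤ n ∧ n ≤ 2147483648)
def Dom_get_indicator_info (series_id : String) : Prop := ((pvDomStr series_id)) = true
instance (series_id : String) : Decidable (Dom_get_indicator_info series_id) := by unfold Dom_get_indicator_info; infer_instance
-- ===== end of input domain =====

-- B replaces A's per-call loop over six category dicts by one hand-written flat
-- series_id -> category table and a single lookup (objective: simpler).

-- ===== PORT A =====
def GDP_INDICATORS : PySem.Dict String String := PySem.Dict.ofList
  [("GDP", "GDP"), ("GDPC1", "GDPC1"), ("GDPPOT", "GDPPOT"), ("NYGDPMKTPCDWLD", "NYGDPMKTPCDWLD")]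

def EMPLOYMENT_INDICATORS : PySem.Dict String String := PySem.Dict.ofList
  [("UNRATE", "UNRATE"), ("CIVPART", "CIVPART"), ("EMRATIO", "EMRATIO"), ("PAYEMS", "PAYEMS"), ("AWHMAN", "AWHMAN")]

def INFLATION_INDICATORS : PySem.Dict String String := PySem.Dict.ofList
  [("CPIAUCSL", "CPIAUCSL"), ("CPILFESL", "CPILFESL"), ("PCEPI", "PCEPI"), ("PCEPILFE", "PCEPILFE"), ("DFEDTARU", "DFEDTARU")]

def INTEREST_RATE_INDICATORS : PySem.Dict String String := PySem.Dict.ofList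
  [("FEDFUNDS", "FEDFUNDS"), ("DGS10", "DGS10"), ("DGS2", "DGS2"), ("DGS3MO", "DGS3MO"), ("MORTGAGE30US", "MORTGAGE30US")]

def CONSUMER_INDICATORS : PySem.Dict String String := PySem.Dict.ofList
  [("PCE", "PCE"), ("PSAVERT", "PSAVERT"), ("UMCSENT", "UMCSENT"), ("RRSFS", "RRSFS")]

def HOUSING_INDICATORS : PySem.Dict String String := PySem.Dict.ofList
  [("HOUST", "HOUST"), ("PERMIT", "PERMIT"), ("CSUSHPISA", "CSUSHPISA"), ("EXHOSLUSM495S", "EXHOSLUSM495S")]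

-- A's 'for category_name, indicators in [...]' loop, as structural recursion
def pvLoopA (series_id : String) : List (String × PySem.Dict String String) → List (String × String)
  | [] => [("category", "Other"), ("series_id", series_id)]
  | (category_name, indicators) :: rest =>
      if indicators.contains series_id then [("category", category_name), ("series_id", series_id)]
      else pvLoopA series_id rest

def get_indicator_info (series_id : String) : List (String × String) :=
  pvLoopA series_id
    [("GDP", GDP_INDICATORS),
     ("Employment", EMPLOYMENT_INDICATORS),
     ("Inflation", INFLATION_INDICATORS),
     ("Interest Rates", INTEREST_RATE_INDICATORS),
     ("Consumer", CONSUMER_INDICATORS),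
     ("Housing", HOUSING_INDICATORS)]

-- ===== PORT B =====
-- Source B's hand-written flat series_id -> category table
def CATEGORY_OF : PySem.Dict String String := PySem.Dict.ofList
  [("GDP", "GDP"), ("GDPC1", "GDP"), ("GDPPOT", "GDP"), ("NYGDPMKTPCDWLD", "GDP"),
   ("UNRATE", "Employment"), ("CIVPART", "Employment"), ("EMRATIO", "Employment"),
   ("PAYEMS", "Employment"), ("AWHMAN", "Employment"),
   ("CPIAUCSL", "Inflation"), ("CPILFESL", "Inflation"), ("PCEPI", "Inflation"),
   ("PCEPILFE", "Inflation"), ("DFEDTARU", "Inflation"),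
   ("FEDFUNDS", "Interest Rates"), ("DGS10", "Interest Rates"), ("DGS2", "Interest Rates"),
   ("DGS3MO", "Interest Rates"), ("MORTGAGE30US", "Interest Rates"),
   ("PCE", "Consumer"), ("PSAVERT", "Consumer"), ("UMCSENT", "Consumer"), ("RRSFS", "Consumer"),
   ("HOUST", "Housing"), ("PERMIT", "Housing"), ("CSUSHPISA", "Housing"),
   ("EXHOSLUSM495S", "Housing")]

def get_indicator_info_alt (series_id : String) : List (String × String) :=
  [("category", CATEGORY_OF.getD series_id "Other"), ("series_id", series_id)]

-- ===== PRECONDITION & SPEC =====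
def Spec_get_indicator_info (series_id : String) (out : List (String × String)) : Prop := out = get_indicator_info_alt series_id
instance (series_id : String) (out : List (String × String)) : Decidable (Spec_get_indicator_info series_id out) := by unfold Spec_get_indicator_info; infer_instance

-- ===== CLAIM =====
def Claim_equal_get_indicator_info : Prop := ∀ (series_id : String), Dom_get_indicator_info series_id → Spec_get_indicator_info series_id (get_indicator_info series_id)

-- ===== LEMMAS AND PROOFS =====

-- first-match lookup across a concatenation of assoc lists
theorem pvGet?_mk_append (l1 l2 : List (String × String)) (x : String) :
    (PySem.Dict.mk (l1 ++ l2) : PySem.Dict String String).get? x =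
      ((PySem.Dict.mk l1 : PySem.Dict String String).get? x).or
        ((PySem.Dict.mk l2 : PySem.Dict String String).get? x) := by
  induction l1 with
  | nil => simp [show (PySem.Dict.mk ([] : List (String × String))).get? x = none from rfl]
  | cons p l1 ih =>
      obtain ⟨k, v⟩ := p
      simp only [List.cons_append, PySem.Dict.get?_mk_cons, ih]
      split_ifs <;> simp

-- lookup in a constant-valued key block
theorem pvGet?_mk_mapConst (n : String) (ks : List String) (x : String) :
    (PySem.Dict.mk (ks.map (fun sid => (sid, n))) : PySem.Dict String String).get? x =
      if x ∈ ks then some n else none := by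
  induction ks with
  | nil => simp [show (PySem.Dict.mk ([] : List (String × String))).get? x = none from rfl]
  | cons k ks ih =>
      simp only [List.map_cons, PySem.Dict.get?_mk_cons, ih, List.mem_cons]
      by_cases h : k = x
      · simp [h]
      · simp [Ne.symm h, show (k == x) = false from by simp [h]]

-- A's loop equals one lookup in the flattened table
theorem pvLoopA_eq (s : String) (cats : List (String × PySem.Dict String String)) :
    pvLoopA s cats =
      [("category",
        (PySem.Dict.mk (cats.flatMap (fun p => p.2.keys.map (fun sid => (sid, p.1))))
          : PySem.Dict String String).getD s "Other"),
       ("series_id", s)] := by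
  induction cats with
  | nil => simp [pvLoopA, PySem.Dict.getD_eq_get?_getD,
      show (PySem.Dict.mk ([] : List (String × String))).get? s = none from rfl]
  | cons p rest ih =>
      obtain ⟨n, d⟩ := p
      simp only [pvLoopA, List.flatMap_cons, PySem.Dict.getD_eq_get?_getD,
        pvGet?_mk_append, pvGet?_mk_mapConst]
      by_cases h : d.contains s = true
      · have hm : s ∈ d.keys := (PySem.Dict.contains_iff_mem_keys d s).mp h
        simp [h, hm]
      · have hm : s ∉ d.keys := fun hmem =>
          h ((PySem.Dict.contains_iff_mem_keys d s).mpr hmem)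
        simp only [PySem.Dict.getD_eq_get?_getD] at ih
        simp [h, hm, ih]

-- B's hand-written flat table IS the flattening of A's six category dicts
theorem pvCATEGORY_OF_eq :
    CATEGORY_OF =
      PySem.Dict.mk
        (([("GDP", GDP_INDICATORS),
           ("Employment", EMPLOYMENT_INDICATORS),
           ("Inflation", INFLATION_INDICATORS),
           ("Interest Rates", INTEREST_RATE_INDICATORS),
           ("Consumer", CONSUMER_INDICATORS),
           ("Housing", HOUSING_INDICATORS)]
          : List (String × PySem.Dict String String)).flatMap
            (fun p => p.2.keys.map (fun sid => (sid, p.1)))) := by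
  decide

-- ===== VERDICT =====
theorem get_indicator_info_spec : Claim_equal_get_indicator_info := by
  intro s _
  unfold Spec_get_indicator_info get_indicator_info get_indicator_info_alt
  rw [pvLoopA_eq, pvCATEGORY_OF_eq]
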